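-- pv_equiv track=rewrite | github.com/dobbelina/repository.dobbelina | plugin.video.cumination/resources/lib/sites/javseen.py | _order_mirrors
-- ===== SOURCE A (Python) =====
-- def _order_mirrors(mirrors):
--     preferred_hosts = (
--         "streamtape",
--         "turbovid",
--         "streamwish",
--         "dood",
--         "cloudwish",
--         "mycloudz",
--     )
--     seen = set()
--     ordered = []
--     for host in preferred_hosts:
--         for mirror in mirrors:
--             if mirror in seen:
--                 continue
--             if host in mirror:
--                 seen.add(mirror)
--                 ordered.append(mirror)
--     for mirror in mirrors:
--         if mirror not in seen:
--             seen.add(mirror)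
--             ordered.append(mirror)
--     return ordered
-- ===== SOURCE B (Python) =====
-- def _order_mirrors(mirrors):
--     preferred_hosts = (
--         "streamtape",
--         "turbovid",
--         "streamwish",
--         "dood",
--         "cloudwish",
--         "mycloudz",
--     )
--
--     def priority(mirror):
--         return next((i for i, host in enumerate(preferred_hosts) if host in mirror),
--                     len(preferred_hosts))
--
--     deduped = list(dict.fromkeys(mirrors))
--     return sorted(deduped, key=priority)
-- ===== Notes on version B (the rewrite author's own statement) =====
-- stated objective: simpler
-- what changed: Replaces A's seven passes over the mirror list (one per preferred host plus a trailing sweep, with a 'seen' set) by one ordered dedup followed by a single stable sort keyed on the index of the first matching preferred host.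
import Mathlib
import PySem

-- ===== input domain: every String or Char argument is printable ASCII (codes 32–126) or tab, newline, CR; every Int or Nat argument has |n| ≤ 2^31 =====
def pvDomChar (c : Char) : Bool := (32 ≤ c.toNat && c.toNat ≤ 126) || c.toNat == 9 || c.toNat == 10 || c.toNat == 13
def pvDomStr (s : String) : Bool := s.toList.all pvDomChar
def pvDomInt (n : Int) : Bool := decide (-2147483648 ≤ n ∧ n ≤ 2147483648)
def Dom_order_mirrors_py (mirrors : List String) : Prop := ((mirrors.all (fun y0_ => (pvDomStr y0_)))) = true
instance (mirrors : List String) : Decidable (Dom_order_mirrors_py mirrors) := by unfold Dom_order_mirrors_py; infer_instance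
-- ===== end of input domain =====

-- B replaces A's seven passes over the mirror list (one per preferred host plus a
-- final sweep, with a 'seen' set) by a single ordered dedup followed by one stable
-- sort keyed on the index of the first matching preferred host (objective: simpler).

-- ===== PORT A =====
def order_mirrors_py (mirrors : List String) : List String :=
  let preferred_hosts : List String :=
    ["streamtape", "turbovid", "streamwish", "dood", "cloudwish", "mycloudz"]
  let st :=
    preferred_hosts.foldl (fun st host =>
      mirrors.foldl (fun (st : PySem.Set String × List String) mirror =>
        if PySem.Set.contains st.1 mirror then st
        else if PySem.Str.isIn host mirror then (PySem.Set.add st.1 mirror, st.2 ++ [mirror])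
        else st) st) (PySem.Set.empty, [])
  let st :=
    mirrors.foldl (fun (st : PySem.Set String × List String) mirror =>
      if !(PySem.Set.contains st.1 mirror) then (PySem.Set.add st.1 mirror, st.2 ++ [mirror])
      else st) st
  st.2

-- ===== PORT B =====
def hostsB : List String :=
  ["streamtape", "turbovid", "streamwish", "dood", "cloudwish", "mycloudz"]

-- priority(mirror) = next((i for i, host in enumerate(preferred_hosts) if host in mirror), len(preferred_hosts))
def priorityB (mirror : String) : Nat :=
  hostsB.findIdx (fun host => PySem.Str.isIn host mirror)

def order_mirrors_py_alt (mirrors : List String) : List String :=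
  PySem.List.sorted (PySem.List.dedup mirrors) priorityB

-- ===== PRECONDITION & SPEC =====
def Spec_order_mirrors_py (mirrors : List String) (out : List String) : Prop := out = order_mirrors_py_alt mirrors
instance (mirrors : List String) (out : List String) : Decidable (Spec_order_mirrors_py mirrors out) := by unfold Spec_order_mirrors_py; infer_instance

-- ===== CLAIM (what is proved, stated in full; the proofs are below) =====
def Claim_equal_order_mirrors_py : Prop := ∀ (mirrors : List String), Dom_order_mirrors_py mirrors → Spec_order_mirrors_py mirrors (order_mirrors_py mirrors)

-- ===== LEMMAS AND PROOFS =====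

-- The sequence A's one pass appends: first occurrences in p, not already in s, passing q.
def newL (q : String → Bool) : List String → List String → List String
  | _, [] => []
  | s, m :: t => if m ∈ s then newL q s t else if q m then m :: newL q (s ++ [m]) t else newL q s t

-- Ordered dedup of p relative to an already-seen list s.
def dedupFrom : List String → List String → List String
  | _, [] => []
  | s, m :: t => if m ∈ s then dedupFrom s t else m :: dedupFrom (s ++ [m]) t

-- The bucketed normal form both programs compute.
def buckets (n : Nat) (l : List String) : List String :=
  (List.range n).flatMap (fun i => l.filter (fun m => decide (priorityB m = i)))

lemma contains_iff (s : PySem.Set String) (x : String) :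
    PySem.Set.contains s x = true ↔ x ∈ s := by
  simp [PySem.Set.contains]

lemma add_of_not_mem (s : PySem.Set String) (x : String) (h : x ∉ s) :
    PySem.Set.add s x = s ++ [x] := by
  simp [PySem.Set.add, PySem.Set.contains, h]

-- One pass of A's loop, characterised: the appended suffix and the seen-set membership.
lemma passA (q : String → Bool) (p : List String) : ∀ (s : PySem.Set String) (o : List String),
    (List.foldl (fun (st : PySem.Set String × List String) m =>
        if PySem.Set.contains st.1 m then st
        else if q m then (PySem.Set.add st.1 m, st.2 ++ [m]) else st) (s, o) p).2
      = o ++ newL q s p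
    ∧ ∀ x, (x ∈ (List.foldl (fun (st : PySem.Set String × List String) m =>
        if PySem.Set.contains st.1 m then st
        else if q m then (PySem.Set.add st.1 m, st.2 ++ [m]) else st) (s, o) p).1
        ↔ x ∈ s ∨ (x ∈ p ∧ q x = true)) := by
  induction p with
  | nil => intro s o; simp [newL]
  | cons m t ih =>
    intro s o
    by_cases hm : m ∈ s
    · have hc : PySem.Set.contains s m = true := (contains_iff s m).mpr hm
      simp only [List.foldl_cons, hc, if_true]
      refine ⟨?_, ?_⟩
      · simpa [newL, hm] using (ih s o).1
      · intro x
        rw [(ih s o).2 x]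
        constructor
        · rintro (h | ⟨h1, h2⟩)
          · exact Or.inl h
          · exact Or.inr ⟨List.mem_cons_of_mem _ h1, h2⟩
        · rintro (h | ⟨h1, h2⟩)
          · exact Or.inl h
          · rcases List.mem_cons.mp h1 with rfl | h1
            · exact Or.inl hm
            · exact Or.inr ⟨h1, h2⟩
    · have hc : PySem.Set.contains s m = false := by
        rw [← Bool.not_eq_true, contains_iff]; exact hm
      by_cases hq : q m = true
      · simp only [List.foldl_cons, hc, hq, if_true, Bool.false_eq_true, if_false]
        rw [add_of_not_mem s m hm]
        refine ⟨?_, ?_⟩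
        · rw [(ih (s ++ [m]) (o ++ [m])).1]
          simp [newL, hm, hq]
        · intro x
          rw [(ih (s ++ [m]) (o ++ [m])).2 x]
          simp only [List.mem_append, List.mem_cons, List.not_mem_nil, or_false]
          constructor
          · rintro ((h | rfl) | ⟨h1, h2⟩)
            · exact Or.inl h
            · exact Or.inr ⟨Or.inl rfl, hq⟩
            · exact Or.inr ⟨Or.inr h1, h2⟩
          · rintro (h | ⟨(rfl | h1), h2⟩)
            · exact Or.inl (Or.inl h)
            · exact Or.inl (Or.inr rfl)
            · exact Or.inr ⟨h1, h2⟩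
      · have hq' : q m = false := by simpa using hq
        simp only [List.foldl_cons, hc, hq', Bool.false_eq_true, if_false]
        refine ⟨?_, ?_⟩
        · simpa [newL, hm, hq'] using (ih s o).1
        · intro x
          rw [(ih s o).2 x]
          simp only [List.mem_cons]
          constructor
          · rintro (h | ⟨h1, h2⟩)
            · exact Or.inl h
            · exact Or.inr ⟨Or.inr h1, h2⟩
          · rintro (h | ⟨(rfl | h1), h2⟩)
            · exact Or.inl h
            · exact absurd h2 (by simp [hq'])
            · exact Or.inr ⟨h1, h2⟩

lemma newL_congr (q q' : String → Bool) : ∀ (p s : List String),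
    (∀ m ∈ p, m ∉ s → q m = q' m) → newL q s p = newL q' s p := by
  intro p
  induction p with
  | nil => intro s _; simp [newL]
  | cons m t ih =>
    intro s h
    by_cases hm : m ∈ s
    · simp only [newL, hm, if_true]
      exact ih s (fun m' hm' hs' => h m' (List.mem_cons_of_mem _ hm') hs')
    · have hqq : q m = q' m := h m (List.mem_cons_self) hm
      simp only [newL, hm, if_false, ← hqq]
      by_cases hq : q m = true
      · simp only [hq, if_true]
        refine congrArg (m :: ·) (ih (s ++ [m]) ?_)
        intro m' hm' hs'
        exact h m' (List.mem_cons_of_mem _ hm') (fun hc => hs' (List.mem_append_left _ hc))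
      · have : q m = false := by simpa using hq
        simp only [this, Bool.false_eq_true, if_false]
        exact ih s (fun m' hm' hs' => h m' (List.mem_cons_of_mem _ hm') hs')

lemma newL_eq_filter (q : String → Bool) : ∀ (p s₁ s₂ : List String),
    (∀ m, q m = true → (m ∈ s₁ ↔ m ∈ s₂)) →
    newL q s₁ p = (dedupFrom s₂ p).filter q := by
  intro p
  induction p with
  | nil => intro s₁ s₂ _; simp [newL, dedupFrom]
  | cons m t ih =>
    intro s₁ s₂ h
    by_cases hq : q m = true
    · have hmm : m ∈ s₁ ↔ m ∈ s₂ := h m hq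
      by_cases hm1 : m ∈ s₁
      · simp only [newL, dedupFrom, hm1, hmm.mp hm1, if_true]
        exact ih s₁ s₂ h
      · have hm2 : m ∉ s₂ := fun hc => hm1 (hmm.mpr hc)
        simp only [newL, dedupFrom, hm1, hm2, if_false, hq, if_true, List.filter_cons_of_pos hq]
        refine congrArg (m :: ·) (ih (s₁ ++ [m]) (s₂ ++ [m]) ?_)
        intro m' hq'
        simp only [List.mem_append, List.mem_singleton]
        rw [h m' hq']
    · have hq' : q m = false := by simpa using hq
      by_cases hm1 : m ∈ s₁ <;> by_cases hm2 : m ∈ s₂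
      · simp only [newL, dedupFrom, hm1, hm2, if_true]; exact ih s₁ s₂ h
      · simp only [newL, dedupFrom, hm1, hm2, if_true, if_false, hq', Bool.false_eq_true]
        rw [List.filter_cons_of_neg (p := q) (by simp [hq'])]
        refine ih s₁ (s₂ ++ [m]) ?_
        intro m' hqm'
        rw [h m' hqm']
        simp only [List.mem_append, List.mem_singleton]
        constructor
        · exact Or.inl
        · rintro (h' | rfl)
          · exact h'
          · exact absurd hqm' (by simp [hq'])
      · simp only [newL, dedupFrom, hm1, hm2, if_true, if_false, hq', Bool.false_eq_true]
        exact ih s₁ s₂ h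
      · simp only [newL, dedupFrom, hm1, hm2, if_false, hq', Bool.false_eq_true]
        rw [List.filter_cons_of_neg (p := q) (by simp [hq'])]
        refine ih s₁ (s₂ ++ [m]) ?_
        intro m' hqm'
        rw [h m' hqm']
        simp only [List.mem_append, List.mem_singleton]
        constructor
        · exact Or.inl
        · rintro (h' | rfl)
          · exact h'
          · exact absurd hqm' (by simp [hq'])

lemma ofList_eq_dedupFrom : ∀ (p s : List String),
    p.foldl PySem.Set.add s = s ++ dedupFrom s p := by
  intro p
  induction p with
  | nil => intro s; simp [dedupFrom]
  | cons m t ih =>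
    intro s
    by_cases hm : m ∈ s
    · have : PySem.Set.add s m = s := by
        simp [PySem.Set.add, PySem.Set.contains, List.contains_iff_mem, hm]
      simp only [List.foldl_cons, this, dedupFrom, hm, if_true]
      exact ih s
    · simp only [List.foldl_cons, add_of_not_mem s m hm, dedupFrom, hm, if_false]
      rw [ih (s ++ [m])]
      simp

lemma dedup_eq_dedupFrom (p : List String) :
    PySem.List.dedup p = dedupFrom [] p := by
  rw [PySem.List.dedup_eq_ofList, PySem.Set.ofList_eq_foldl]
  simpa using ofList_eq_dedupFrom p []

lemma prio_le_six (m : String) : priorityB m ≤ 6 := by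
  have := List.findIdx_le_length (p := fun host => PySem.Str.isIn host m) (xs := hostsB)
  simpa [priorityB, hostsB] using this

lemma prio_le_of_isIn (m : String) (j : Nat) (hj : j < hostsB.length)
    (h : PySem.Str.isIn (hostsB[j]'hj) m = true) : priorityB m ≤ j := by
  by_contra hlt
  push_neg at hlt
  have := List.not_of_lt_findIdx (p := fun host => PySem.Str.isIn host m) (xs := hostsB)
    (i := j) (by simpa [priorityB] using hlt)
  simp only at this
  exact Bool.false_ne_true (this.symm.trans h)

lemma isIn_of_prio_eq (m : String) (j : Nat) (hj : j < hostsB.length)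
    (h : priorityB m = j) : PySem.Str.isIn (hostsB[j]'hj) m = true := by
  have w : hostsB.findIdx (fun host => PySem.Str.isIn host m) < hostsB.length := by
    rw [priorityB] at h; omega
  have hg := List.findIdx_getElem (p := fun host => PySem.Str.isIn host m) (xs := hostsB) (w := w)
  simp only at hg
  rw [priorityB] at h
  simp only [h] at hg
  exact hg

-- ===== the sorted side: sorted by priority = concatenation of the 7 priority buckets =====

lemma insertBy_append_left (before : String → String → Bool) (x : String) :
    ∀ (P Q : List String), (∀ y ∈ P, before x y = false) →
    PySem.List.insertBy before x (P ++ Q) = P ++ PySem.List.insertBy before x Q := by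
  intro P
  induction P with
  | nil => intro Q _; simp
  | cons y P ih =>
    intro Q h
    have hy : before x y = false := h y List.mem_cons_self
    simp only [List.cons_append, PySem.List.insertBy, hy, Bool.false_eq_true, if_false]
    rw [ih Q (fun y' hy' => h y' (List.mem_cons_of_mem _ hy'))]

lemma insertBy_all_before (before : String → String → Bool) (x : String)
    (Q : List String) (h : ∀ y ∈ Q, before x y = true) :
    PySem.List.insertBy before x Q = x :: Q := by
  cases Q with
  | nil => rfl
  | cons y Q => simp [PySem.List.insertBy, h y List.mem_cons_self]

lemma insertBy_buckets (x : String) (l : List String) :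
    PySem.List.insertBy (fun a b => decide (priorityB a < priorityB b)) x (buckets 7 l)
      = buckets 7 (l ++ [x]) := by
  have hk : priorityB x ≤ 6 := prio_le_six x
  set k := priorityB x with hkdef
  have h7 : (7 : Nat) = (k + 1) + (6 - k) := by omega
  unfold buckets
  rw [h7, List.range_add, List.flatMap_append, List.flatMap_append]
  set f := fun i => l.filter (fun m => decide (priorityB m = i)) with hf
  set f' := fun i => (l ++ [x]).filter (fun m => decide (priorityB m = i)) with hf'
  have hQ : (List.map (fun i => k + 1 + i) (List.range (6 - k))).flatMap f'
      = (List.map (fun i => k + 1 + i) (List.range (6 - k))).flatMap f := by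
    refine List.flatMap_congr ?_
    intro i hi
    simp only [List.mem_map, List.mem_range] at hi
    obtain ⟨j, _, rfl⟩ := hi
    simp only [hf, hf', List.filter_append]
    have : (decide (priorityB x = k + 1 + j)) = false := by
      simp only [decide_eq_false_iff_not, ← hkdef]; omega
    simp [this]
  rw [hQ]
  have hPleft : ∀ y ∈ (List.range (k + 1)).flatMap f,
      (fun a b => decide (priorityB a < priorityB b)) x y = false := by
    intro y hy
    simp only [List.mem_flatMap, List.mem_range, hf, List.mem_filter,
      decide_eq_true_eq] at hy
    obtain ⟨i, hi, _, hyi⟩ := hy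
    simp only [decide_eq_false_iff_not, ← hkdef, hyi]
    omega
  have hQright : ∀ y ∈ (List.map (fun i => k + 1 + i) (List.range (6 - k))).flatMap f,
      (fun a b => decide (priorityB a < priorityB b)) x y = true := by
    intro y hy
    simp only [List.mem_flatMap, List.mem_map, List.mem_range, hf, List.mem_filter,
      decide_eq_true_eq] at hy
    obtain ⟨i, ⟨j, _, rfl⟩, _, hyi⟩ := hy
    simp only [decide_eq_true_eq, ← hkdef, hyi]
    omega
  rw [insertBy_append_left _ x _ _ hPleft,
    insertBy_all_before _ x _ hQright]
  -- left part: range (k+1) = range k ++ [k]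
  have hle : (List.range (k + 1)).flatMap f' = (List.range k).flatMap f ++ (f k ++ [x]) := by
    rw [List.range_succ, List.flatMap_append]
    congr 1
    · refine List.flatMap_congr ?_
      intro i hi
      simp only [List.mem_range] at hi
      simp only [hf, hf', List.filter_append]
      have : (decide (priorityB x = i)) = false := by
        simp only [decide_eq_false_iff_not, ← hkdef]; omega
      simp [this]
    · simp only [List.flatMap_cons, List.flatMap_nil, List.append_nil, hf, hf',
        List.filter_append]
      congr 1
      simp [← hkdef]
  have hre : (List.range (k + 1)).flatMap f = (List.range k).flatMap f ++ f k := by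
    rw [List.range_succ, List.flatMap_append]
    simp
  rw [hle, hre]
  simp

lemma sorted_eq_buckets (l : List String) :
    PySem.List.sorted l priorityB = buckets 7 l := by
  induction l using List.reverseRecOn with
  | nil => simp [buckets, PySem.List.sorted_eq_foldl_insertBy]
  | append_singleton l x ih =>
    rw [PySem.List.sorted_eq_foldl_insertBy, List.foldl_append, List.foldl_cons, List.foldl_nil,
      ← PySem.List.sorted_eq_foldl_insertBy, ih, insertBy_buckets]

-- One preferred-host pass of A, for host = preferred_hosts[j]: appends bucket j of
-- the deduped mirrors, and extends the seen set to priorities < j+1.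
lemma pass_good (mirrors : List String) (j : Nat) (host : String)
    (h1 : ∀ m, PySem.Str.isIn host m = true → priorityB m ≤ j)
    (h2 : ∀ m, priorityB m = j → PySem.Str.isIn host m = true)
    (st : PySem.Set String × List String)
    (hs : ∀ x, x ∈ st.1 ↔ (x ∈ mirrors ∧ priorityB x < j)) :
    (List.foldl (fun (st : PySem.Set String × List String) mirror =>
        if PySem.Set.contains st.1 mirror then st
        else if PySem.Str.isIn host mirror then (PySem.Set.add st.1 mirror, st.2 ++ [mirror])
        else st) st mirrors).2
      = st.2 ++ (dedupFrom [] mirrors).filter (fun m => decide (priorityB m = j))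
    ∧ ∀ x, (x ∈ (List.foldl (fun (st : PySem.Set String × List String) mirror =>
        if PySem.Set.contains st.1 mirror then st
        else if PySem.Str.isIn host mirror then (PySem.Set.add st.1 mirror, st.2 ++ [mirror])
        else st) st mirrors).1 ↔ (x ∈ mirrors ∧ priorityB x < j + 1)) := by
  obtain ⟨s, o⟩ := st
  simp only at hs
  obtain ⟨hsnd, hfst⟩ := passA (fun m => PySem.Str.isIn host m) mirrors s o
  constructor
  · rw [hsnd]
    congr 1
    rw [newL_congr (fun m => PySem.Str.isIn host m) (fun m => decide (priorityB m = j)) mirrors s ?_]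
    · refine newL_eq_filter _ mirrors s [] ?_
      intro m hm
      simp only [decide_eq_true_eq] at hm
      simp only [List.not_mem_nil, iff_false]
      intro hc
      have := (hs m).1 hc
      omega
    · intro m hmem hnot
      show PySem.Str.isIn host m = decide (priorityB m = j)
      have hge : ¬ priorityB m < j := fun hlt => hnot ((hs m).2 ⟨hmem, hlt⟩)
      by_cases hin : PySem.Str.isIn host m = true
      · have hle := h1 m hin
        have hj : priorityB m = j := by omega
        rw [hin, hj]
        simp
      · have hne : priorityB m ≠ j := fun he => hin (h2 m he)
        have hin' : PySem.Str.isIn host m = false := by simpa using hin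
        rw [hin']
        simp [hne]
  · intro x
    rw [hfst x, hs x]
    constructor
    · rintro (⟨hm, hlt⟩ | ⟨hm, hq⟩)
      · exact ⟨hm, by omega⟩
      · exact ⟨hm, by have := h1 x hq; omega⟩
    · rintro ⟨hm, hlt⟩
      by_cases hx : priorityB x < j
      · exact Or.inl ⟨hm, hx⟩
      · have hxe : priorityB x = j := by omega
        exact Or.inr ⟨hm, h2 x hxe⟩

-- A's trailing sweep: appends the bucket of mirrors matching no preferred host.
lemma final_pass (mirrors : List String) (st : PySem.Set String × List String)
    (hs : ∀ x, x ∈ st.1 ↔ (x ∈ mirrors ∧ priorityB x < 6)) :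
    (List.foldl (fun (st : PySem.Set String × List String) mirror =>
        if !(PySem.Set.contains st.1 mirror) then (PySem.Set.add st.1 mirror, st.2 ++ [mirror])
        else st) st mirrors).2
      = st.2 ++ (dedupFrom [] mirrors).filter (fun m => decide (priorityB m = 6)) := by
  obtain ⟨s, o⟩ := st
  simp only at hs
  have hfun : (fun (st : PySem.Set String × List String) mirror =>
        if !(PySem.Set.contains st.1 mirror) then (PySem.Set.add st.1 mirror, st.2 ++ [mirror])
        else st)
      = (fun (st : PySem.Set String × List String) m =>
        if PySem.Set.contains st.1 m then st
        else if (fun _ : String => true) m then (PySem.Set.add st.1 m, st.2 ++ [m]) else st) := by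
    funext st m
    by_cases hc : PySem.Set.contains st.1 m = true <;> simp [hc]
  rw [hfun]
  obtain ⟨hsnd, _⟩ := passA (fun _ => true) mirrors s o
  rw [hsnd]
  congr 1
  rw [newL_congr (fun _ => true) (fun m => decide (priorityB m = 6)) mirrors s ?_]
  · refine newL_eq_filter _ mirrors s [] ?_
    intro m hm
    simp only [decide_eq_true_eq] at hm
    simp only [List.not_mem_nil, iff_false]
    intro hc
    have := (hs m).1 hc
    omega
  · intro m hmem hnot
    have hge : ¬ priorityB m < 6 := fun hlt => hnot ((hs m).2 ⟨hmem, hlt⟩)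
    have := prio_le_six m
    have h6 : priorityB m = 6 := by omega
    show true = decide (priorityB m = 6)
    simp [h6]

-- ===== VERDICT (by name: the statement is the Claim_ definition above) =====
theorem order_mirrors_py_spec : Claim_equal_order_mirrors_py := by
  intro mirrors _
  unfold Spec_order_mirrors_py order_mirrors_py order_mirrors_py_alt
  rw [dedup_eq_dedupFrom, sorted_eq_buckets]
  simp only [List.foldl_cons, List.foldl_nil]
  have hs0 : ∀ x, x ∈ ((PySem.Set.empty, ([] : List String)) :
      PySem.Set String × List String).1 ↔ (x ∈ mirrors ∧ priorityB x < 0) := by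
    intro x; simp [PySem.Set.empty]
  have h0 := pass_good mirrors 0 "streamtape"
    (fun m h => prio_le_of_isIn m 0 (by decide) h)
    (fun m h => isIn_of_prio_eq m 0 (by decide) h) _ hs0
  have h1 := pass_good mirrors 1 "turbovid"
    (fun m h => prio_le_of_isIn m 1 (by decide) h)
    (fun m h => isIn_of_prio_eq m 1 (by decide) h) _ h0.2
  have h2 := pass_good mirrors 2 "streamwish"
    (fun m h => prio_le_of_isIn m 2 (by decide) h)
    (fun m h => isIn_of_prio_eq m 2 (by decide) h) _ h1.2
  have h3 := pass_good mirrors 3 "dood"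
    (fun m h => prio_le_of_isIn m 3 (by decide) h)
    (fun m h => isIn_of_prio_eq m 3 (by decide) h) _ h2.2
  have h4 := pass_good mirrors 4 "cloudwish"
    (fun m h => prio_le_of_isIn m 4 (by decide) h)
    (fun m h => isIn_of_prio_eq m 4 (by decide) h) _ h3.2
  have h5 := pass_good mirrors 5 "mycloudz"
    (fun m h => prio_le_of_isIn m 5 (by decide) h)
    (fun m h => isIn_of_prio_eq m 5 (by decide) h) _ h4.2
  have h6 := final_pass mirrors _ h5.2
  rw [h6, h5.1, h4.1, h3.1, h2.1, h1.1, h0.1]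
  simp [buckets, List.range_succ]
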